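-- pv_equiv track=rewrite | github.com/alexzhangaz48/leetcode_workspace_2023 | 2215. Find the Difference of Two Arrays/two_pointers.py | findDistinctIntegers
-- ===== SOURCE A (Python) =====
-- def findDistinctIntegers(nums1, nums2):
--     nums1.sort()
--     nums2.sort()
--
--     answer_0 = []
--     answer_1 = []
--
--     i = j = 0
--
--     while i < len(nums1) and j < len(nums2):
--         if nums1[i] == nums2[j]:
--             i += 1
--             j += 1
--         elif nums1[i] < nums2[j]:
--             answer_0.append(nums1[i])
--             i += 1
--         else:
--             answer_1.append(nums2[j])
--             j += 1
--
--     # Add remaining elements from nums1 and nums2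
--     while i < len(nums1):
--         answer_0.append(nums1[i])
--         i += 1
--
--     while j < len(nums2):
--         answer_1.append(nums2[j])
--         j += 1
--
--     return [answer_0, answer_1]
-- ===== SOURCE B (Python) =====
-- def _diff(a, b):
--     # multiset difference a - b, preserving a's (sorted) order, via a hash count of b
--     need = {}
--     for x in b:
--         need[x] = need.get(x, 0) + 1
--     res = []
--     for x in a:
--         if need.get(x, 0) > 0:
--             need[x] = need[x] - 1
--         else:
--             res.append(x)
--     return res
--
--
-- def findDistinctIntegers(nums1, nums2):
--     nums1.sort()
--     nums2.sort()
--     return [_diff(nums1, nums2), _diff(nums2, nums1)]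
-- ===== Notes on version B (the rewrite author's own statement) =====
-- stated objective: alternative
-- what changed: Replaces the two-pointer merge (three while-loops with index bookkeeping) by a hash-count multiset difference in each direction: count one list in a dict, then keep each element of the other that cannot consume a remaining count.
import Mathlib
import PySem

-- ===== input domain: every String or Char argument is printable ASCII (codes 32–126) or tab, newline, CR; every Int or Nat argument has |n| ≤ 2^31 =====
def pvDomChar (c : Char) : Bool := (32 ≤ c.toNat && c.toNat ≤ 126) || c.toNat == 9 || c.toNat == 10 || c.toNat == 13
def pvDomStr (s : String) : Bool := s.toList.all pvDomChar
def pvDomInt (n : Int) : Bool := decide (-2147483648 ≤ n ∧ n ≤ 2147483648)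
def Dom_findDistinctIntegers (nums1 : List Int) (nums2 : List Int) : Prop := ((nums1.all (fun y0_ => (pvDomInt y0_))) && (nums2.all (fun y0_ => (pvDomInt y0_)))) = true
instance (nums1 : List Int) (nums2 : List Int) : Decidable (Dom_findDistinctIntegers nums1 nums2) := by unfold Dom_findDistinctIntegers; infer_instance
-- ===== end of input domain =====

-- B replaces A's three-while-loop two-pointer merge by a two-sided multiset difference
-- computed with a hash count (dict) of the other list; objective: alternative (same overall cost).
-- A sorts both argument lists in place; B performs the same mutation; the theorem is about the return value.

-- ===== PORT A =====
-- the while-loop over indices i, j, ported as structural recursion on the two suffixes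
def pvMergeGo : List Int → List Int → List Int × List Int
  | [], ys => ([], ys)                                   -- 1st loop done; 3rd loop appends rest of nums2
  | x :: xs, [] => (x :: xs, [])                         -- 2nd loop appends rest of nums1
  | x :: xs, y :: ys =>
      if x = y then pvMergeGo xs ys
      else if x < y then
        let r := pvMergeGo xs (y :: ys); (x :: r.1, r.2)
      else
        let r := pvMergeGo (x :: xs) ys; (r.1, y :: r.2)
  termination_by a b => a.length + b.length

def findDistinctIntegers (nums1 : List Int) (nums2 : List Int) : List (List Int) :=
  let s1 := PySem.List.sorted nums1 (fun x => x) false   -- nums1.sort()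
  let s2 := PySem.List.sorted nums2 (fun x => x) false   -- nums2.sort()
  let r := pvMergeGo s1 s2
  [r.1, r.2]

-- ===== PORT B =====
-- _diff(a, b): count b into a dict, then keep each x of a that cannot consume a remaining count
def pvBuildNeed (b : List Int) : PySem.Dict Int Int :=
  b.foldl (fun d x => d.insert x (d.getD x 0 + 1)) PySem.Dict.empty

def pvDiffStep (st : PySem.Dict Int Int × List Int) (x : Int) : PySem.Dict Int Int × List Int :=
  if st.1.getD x 0 > 0 then
    (st.1.insert x (st.1.getD x 0 - 1), st.2)   -- need[x] = need[x] - 1 (present: the guard just read a positive count)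
  else
    (st.1, st.2 ++ [x])

def pvDiff (a b : List Int) : List Int := (a.foldl pvDiffStep (pvBuildNeed b, [])).2

def findDistinctIntegers_alt (nums1 : List Int) (nums2 : List Int) : List (List Int) :=
  let s1 := PySem.List.sorted nums1 (fun x => x) false
  let s2 := PySem.List.sorted nums2 (fun x => x) false
  [pvDiff s1 s2, pvDiff s2 s1]

-- ===== PRECONDITION & SPEC =====
def Spec_findDistinctIntegers (nums1 : List Int) (nums2 : List Int) (out : List (List Int)) : Prop := out = findDistinctIntegers_alt nums1 nums2
instance (nums1 : List Int) (nums2 : List Int) (out : List (List Int)) : Decidable (Spec_findDistinctIntegers nums1 nums2 out) := by unfold Spec_findDistinctIntegers; infer_instance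

-- ===== CLAIM (what is proved, stated in full; the proofs are below) =====
def Claim_equal_findDistinctIntegers : Prop := ∀ (nums1 : List Int) (nums2 : List Int), Dom_findDistinctIntegers nums1 nums2 → Spec_findDistinctIntegers nums1 nums2 (findDistinctIntegers nums1 nums2)

-- ===== LEMMAS AND PROOFS =====

-- one step of List.diff from the left
theorem cons_diff (x : Int) (a m : List Int) :
    (x :: a).diff m = if x ∈ m then a.diff (m.erase x) else x :: a.diff m := by
  induction m generalizing a with
  | nil => simp
  | cons c m ih =>
      by_cases hxc : x = c
      · subst hxc
        simp [List.diff_cons]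
      · have hne : ¬ c = x := fun e => hxc e.symm
        rw [List.diff_cons, List.erase_cons, if_neg (by simp [hxc] : ¬ ((x == c) = true)), ih (a.erase c)]
        by_cases hxm : x ∈ m
        · rw [if_pos hxm, if_pos (List.mem_cons_of_mem _ hxm), List.erase_cons,
            if_neg (by simp [hne] : ¬ ((c == x) = true)), List.diff_cons]
        · have hnc : x ∉ c :: m := by simp [hxc, hxm]
          rw [if_neg hxm, if_neg hnc, List.diff_cons]

theorem cons_diff_of_not_mem (x : Int) (a b : List Int) (h : x ∉ b) :
    (x :: a).diff b = x :: a.diff b := by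
  rw [cons_diff, if_neg h]

-- B's second loop, under the invariant that the dict holds the counts of some list m
theorem pvDiff_loop (a : List Int) (d : PySem.Dict Int Int) (m res : List Int)
    (h : ∀ x, d.getD x 0 = (m.count x : Int)) :
    (a.foldl pvDiffStep (d, res)).2 = res ++ a.diff m := by
  induction a generalizing d m res with
  | nil => simp
  | cons x a ih =>
      rw [List.foldl_cons]
      by_cases hx : x ∈ m
      · have hcnt : 0 < m.count x := List.count_pos_iff.mpr hx
        have hpos : (d, res).1.getD x 0 > 0 := by rw [h x]; exact_mod_cast hcnt
        rw [pvDiffStep, if_pos hpos]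
        have hinv : ∀ y, (d.insert x (d.getD x 0 - 1)).getD y 0 = ((m.erase x).count y : Int) := by
          intro y
          rw [PySem.Dict.getD_insert]
          by_cases hyx : y = x
          · subst hyx
            rw [if_pos rfl, h y, List.count_erase_self]
            omega
          · rw [if_neg hyx, h y, List.count_erase_of_ne hyx]
        rw [ih _ _ _ hinv, cons_diff, if_pos hx]
      · have hz : ¬ (d, res).1.getD x 0 > 0 := by
          rw [h x, List.count_eq_zero_of_not_mem hx]; omega
        rw [pvDiffStep, if_neg hz]
        rw [ih _ _ _ h, cons_diff, if_neg hx]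
        simp

-- B's fold computes List.diff.
theorem pvDiff_eq_diff (a b : List Int) : pvDiff a b = a.diff b := by
  have h : ∀ x, (pvBuildNeed b).getD x 0 = (b.count x : Int) := by
    intro x
    rw [pvBuildNeed, PySem.Dict.foldl_insert_getD_add_one_eq_counter, PySem.Dict.getD_counter]
  rw [pvDiff, pvDiff_loop a _ b [] h, List.nil_append]

-- A's merge on sorted lists computes the two multiset differences.
theorem pvMergeGo_eq_diff (a b : List Int)
    (ha : a.Pairwise (· ≤ ·)) (hb : b.Pairwise (· ≤ ·)) :
    pvMergeGo a b = (a.diff b, b.diff a) := by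
  induction hn : a.length + b.length using Nat.strong_induction_on generalizing a b with
  | _ n ih =>
    match a, b with
    | [], ys => simp [pvMergeGo]
    | x :: xs, [] => simp [pvMergeGo]
    | x :: xs, y :: ys =>
      rw [pvMergeGo]
      rcases lt_trichotomy x y with hlt | heq | hgt
      · -- x < y : x is not in y::ys, so it goes to the first output
        have hxnot : x ∉ y :: ys := by
          intro m
          rcases List.mem_cons.mp m with e | m'
          · omega
          · have := (List.pairwise_cons.mp hb).1 x m'; omega
        have hxs : xs.Pairwise (· ≤ ·) := (List.pairwise_cons.mp ha).2
        have hrec := ih (xs.length + (y :: ys).length) (by simp only [List.length_cons] at hn ⊢; omega)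
          xs (y :: ys) hxs hb rfl
        have h1 : ¬ x = y := by omega
        simp only [if_neg h1, if_pos hlt, hrec, Prod.mk.injEq]
        refine ⟨(cons_diff_of_not_mem x xs (y :: ys) hxnot).symm, ?_⟩
        rw [List.diff_cons, List.erase_of_not_mem hxnot]
      · -- x = y : both heads are consumed
        subst heq
        have hxs : xs.Pairwise (· ≤ ·) := (List.pairwise_cons.mp ha).2
        have hys : ys.Pairwise (· ≤ ·) := (List.pairwise_cons.mp hb).2
        have hrec := ih (xs.length + ys.length) (by simp only [List.length_cons] at hn ⊢; omega)
          xs ys hxs hys rfl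
        simp [hrec, List.diff_cons]
      · -- y < x : symmetric
        have hynot : y ∉ x :: xs := by
          intro m
          rcases List.mem_cons.mp m with e | m'
          · omega
          · have := (List.pairwise_cons.mp ha).1 y m'; omega
        have hys : ys.Pairwise (· ≤ ·) := (List.pairwise_cons.mp hb).2
        have hrec := ih ((x :: xs).length + ys.length) (by simp only [List.length_cons] at hn ⊢; omega)
          (x :: xs) ys ha hys rfl
        have h1 : ¬ x = y := by omega
        have h2 : ¬ x < y := by omega
        simp only [if_neg h1, if_neg h2, hrec, Prod.mk.injEq]
        refine ⟨?_, (cons_diff_of_not_mem y ys (x :: xs) hynot).symm⟩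
        rw [List.diff_cons, List.erase_of_not_mem hynot]

-- ===== VERDICT (by name: the statement is the Claim_ definition above) =====
theorem findDistinctIntegers_spec : Claim_equal_findDistinctIntegers := by
  intro nums1 nums2 _
  unfold Spec_findDistinctIntegers findDistinctIntegers findDistinctIntegers_alt
  have h := pvMergeGo_eq_diff (PySem.List.sorted nums1 (fun x => x) false)
    (PySem.List.sorted nums2 (fun x => x) false)
    (PySem.List.sorted_pairwise nums1 (fun x => x))
    (PySem.List.sorted_pairwise nums2 (fun x => x))
  simp [h, pvDiff_eq_diff]
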